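-- pv_equiv track=rewrite | github.com/alperengozeten/CoT2 | data/generate_data.py | generate_text_dataset_one_shot
-- ===== SOURCE A (Python) =====
-- import itertools
--
-- def generate_text_dataset_one_shot(digit_range=range(1, 6), seq_length=4):
--     """
--     Produces lines such as
--         <BOS> D5 D3 D2 D4 -> -> -> -> S1 <EOS>
--     i.e. *seq_length* arrows followed by ONE answer token.
--     """
--     dataset_text = []
--
--     for seq in itertools.product(digit_range, repeat=seq_length):
--         best_final = None
--         for signs in itertools.product(["+", "-"], repeat=seq_length):
--             s = 0
--             for d, sign in zip(seq, signs):
--                 s = s + d if sign == "+" else s - d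
--             if s >= 0 and (best_final is None or s < best_final):
--                 best_final = s
--
--         if best_final is None:          # no non‑negative path
--             continue
--
--         # ---------- build the textual example -------------------------
--         digit_tokens  = [f"D{d}" for d in seq]
--         arrows        = ["->"] * seq_length          # N arrows
--         answer_token  = f"S{best_final}"
--
--         line = " ".join(["<BOS>"] + digit_tokens + arrows +
--                         [answer_token, "<EOS>"])
--         dataset_text.append(line)
--
--     return dataset_text
-- ===== SOURCE B (Python) =====
-- def generate_text_dataset_one_shot(digit_range=range(1, 6), seq_length=4):
--     # DFS over digit prefixes carrying the set of reachable signed sums (subset-sum DP),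
--     # instead of enumerating all 2^n sign patterns per complete sequence.
--     digits = list(digit_range)
--     dataset_text = []
--
--     def emit(prefix, sums, remaining):
--         if remaining <= 0:
--             nonneg = [s for s in sums if s >= 0]
--             if nonneg:
--                 tokens = (["<BOS>"] + [f"D{d}" for d in prefix]
--                           + ["->"] * seq_length + [f"S{min(nonneg)}", "<EOS>"])
--                 dataset_text.append(" ".join(tokens))
--             return
--         for d in digits:
--             emit(prefix + [d], {s + d for s in sums} | {s - d for s in sums},
--                  remaining - 1)
--
--     emit([], {0}, seq_length)
--     return dataset_text
-- ===== Notes on version B (the rewrite author's own statement) =====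
-- stated objective: alternative
-- what changed: Replaces the inner enumeration of all 2^n sign patterns per sequence by a DFS over digit prefixes carrying the set of reachable signed sums (subset-sum DP), taking the minimum non-negative reachable sum.
import Mathlib
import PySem

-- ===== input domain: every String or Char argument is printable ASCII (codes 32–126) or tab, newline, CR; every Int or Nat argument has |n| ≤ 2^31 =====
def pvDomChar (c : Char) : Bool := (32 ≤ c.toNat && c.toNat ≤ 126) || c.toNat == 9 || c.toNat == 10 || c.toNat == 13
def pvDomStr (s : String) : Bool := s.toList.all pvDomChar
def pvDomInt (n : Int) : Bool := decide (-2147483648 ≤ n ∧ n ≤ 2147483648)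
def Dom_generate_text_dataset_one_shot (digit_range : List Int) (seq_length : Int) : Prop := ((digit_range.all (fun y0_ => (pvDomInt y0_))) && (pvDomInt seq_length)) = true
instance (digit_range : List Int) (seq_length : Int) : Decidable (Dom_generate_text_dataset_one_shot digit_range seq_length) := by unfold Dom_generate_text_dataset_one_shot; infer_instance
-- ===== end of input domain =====

-- B replaces A's per-sequence enumeration of all 2^n sign patterns by a DFS over digit prefixes
-- carrying the set of reachable signed sums (subset-sum DP); minimum non-negative reachable sum.


-- ===== PORT A =====
-- itertools.product(xs, repeat=n): rightmost position varies fastest (right extension)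
def pvProdA (xs : List Int) : Nat → List (List Int)
  | 0 => [[]]
  | n + 1 => (pvProdA xs n).flatMap (fun s => xs.map (fun d => s ++ [d]))

-- itertools.product(["+","-"], repeat=n)
def pvSignsA : Nat → List (List String)
  | 0 => [[]]
  | n + 1 => (pvSignsA n).flatMap (fun s => ["+", "-"].map (fun c => s ++ [c]))

-- s = 0; for d, sign in zip(seq, signs): s = s + d if sign == "+" else s - d
def pvSumA (seq : List Int) (signs : List String) : Int :=
  (seq.zip signs).foldl (fun s p => if p.2 == "+" then s + p.1 else s - p.1) 0

-- the inner loop updating best_final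
def pvUpdA (best : Option Int) (s : Int) : Option Int :=
  if 0 ≤ s then
    match best with
    | none => some s
    | some b => if s < b then some s else best
  else best

def pvBestA (seq : List Int) (n : Nat) : Option Int :=
  (pvSignsA n).foldl (fun best signs => pvUpdA best (pvSumA seq signs)) none

def pvLineA (seq : List Int) (n : Nat) (best : Int) : String :=
  PySem.Str.join " " (["<BOS>"] ++ seq.map (fun d => "D" ++ PySem.Int.toStr d)
    ++ List.replicate n "->" ++ ["S" ++ PySem.Int.toStr best, "<EOS>"])

def generate_text_dataset_one_shot (digit_range : List Int) (seq_length : Int) : List String :=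
  let n := seq_length.toNat
  (pvProdA digit_range n).foldl (fun acc seq =>
    match pvBestA seq n with
    | none => acc
    | some b => acc ++ [pvLineA seq n b]) []

-- ===== PORT B =====
-- sums = {s + d for s in sums} | {s - d for s in sums}
def pvStepB (sums : PySem.Set Int) (d : Int) : PySem.Set Int :=
  PySem.Set.union (PySem.Set.ofList (sums.map (fun s => s + d))) (sums.map (fun s => s - d))

-- the 'for d in digits' loop around the recursive call emit(prefix + [d], …, remaining - 1)
def pvEmitLoop (f : List Int → PySem.Set Int → List String → List String)
    (pre : List Int) (sums : PySem.Set Int) (acc : List String) : List Int → List String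
  | [] => acc
  | d :: ds => pvEmitLoop f pre sums (f (pre ++ [d]) (pvStepB sums d) acc) ds

-- the recursive emit(prefix, sums, remaining); remaining is a count ≥ 0, recursed on as a Nat
def pvEmitB (digits : List Int) (m : Int) : Nat → List Int → PySem.Set Int → List String → List String
  | 0, pre, sums, acc =>
    let nonneg := sums.filter (fun s => decide (0 ≤ s))
    match PySem.List.min? nonneg (fun x => x) with
    | none => acc
    | some b => acc ++ [PySem.Str.join " " ("<BOS>" ::
        (pre.map (fun d => "D" ++ PySem.Int.toStr d) ++ List.replicate m.toNat "->"
          ++ ["S" ++ PySem.Int.toStr b, "<EOS>"]))]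
  | n + 1, pre, sums, acc => pvEmitLoop (pvEmitB digits m n) pre sums acc digits

def generate_text_dataset_one_shot_alt (digit_range : List Int) (seq_length : Int) : List String :=
  pvEmitB digit_range seq_length seq_length.toNat [] (PySem.Set.ofList [0]) []

-- ===== PRECONDITION & SPEC =====
-- itertools.product(…, repeat=seq_length) raises ValueError for negative repeat, so A only returns for 0 ≤ seq_length.
def Pre_generate_text_dataset_one_shot (digit_range : List Int) (seq_length : Int) : Prop :=
  0 ≤ seq_length
instance (digit_range : List Int) (seq_length : Int) : Decidable (Pre_generate_text_dataset_one_shot digit_range seq_length) := by unfold Pre_generate_text_dataset_one_shot; infer_instance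
def pvWitness_generate_text_dataset_one_shot : List Int × Int := ([1, 2, 3], 2)

def Spec_generate_text_dataset_one_shot (digit_range : List Int) (seq_length : Int) (out : List String) : Prop := out = generate_text_dataset_one_shot_alt digit_range seq_length
instance (digit_range : List Int) (seq_length : Int) (out : List String) : Decidable (Spec_generate_text_dataset_one_shot digit_range seq_length out) := by unfold Spec_generate_text_dataset_one_shot; infer_instance

-- ===== CLAIM (what is proved, stated in full; the proofs are below) =====
def Claim_equal_generate_text_dataset_one_shot : Prop := ∀ (digit_range : List Int) (seq_length : Int), Dom_generate_text_dataset_one_shot digit_range seq_length → Pre_generate_text_dataset_one_shot digit_range seq_length → Spec_generate_text_dataset_one_shot digit_range seq_length (generate_text_dataset_one_shot digit_range seq_length)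

-- ===== LEMMAS AND PROOFS =====

-- proof-side abbreviations
def pvSumsB (seq : List Int) : PySem.Set Int :=
  seq.foldl pvStepB (PySem.Set.ofList [0])

def pvBestB (seq : List Int) : Option Int :=
  PySem.List.min? ((pvSumsB seq).filter (fun s => decide (0 ≤ s))) (fun x => x)

-- what pvEmitB does at a leaf, as a function of the full sequence and its sum set
def pvLeaf (m : Int) (seq : List Int) (sums : PySem.Set Int) (acc : List String) : List String :=
  match PySem.List.min? (sums.filter (fun s => decide (0 ≤ s))) (fun x => x) with
  | none => acc
  | some b => acc ++ [PySem.Str.join " " ("<BOS>" ::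
      (seq.map (fun d => "D" ++ PySem.Int.toStr d) ++ List.replicate m.toNat "->"
        ++ ["S" ++ PySem.Int.toStr b, "<EOS>"]))]

-- left-extension characterisation of the product
theorem pvProdA_succ_left (xs : List Int) (n : Nat) :
    pvProdA xs (n + 1) = xs.flatMap (fun d => (pvProdA xs n).map (fun s => d :: s)) := by
  induction n with
  | zero =>
    have h : ∀ (l : List Int), l.flatMap (fun d => [[d]]) = l.map (fun d => [d]) := by
      intro l
      induction l with
      | nil => rfl
      | cons a t ih => simp [ih]
    show ([[]] : List (List Int)).flatMap (fun s => xs.map (fun d => s ++ [d])) = _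
    simp [pvProdA, h]
  | succ n ih =>
    show (pvProdA xs (n + 1)).flatMap (fun s => xs.map (fun d => s ++ [d])) = _
    conv_lhs => rw [ih]
    rw [List.flatMap_assoc]
    apply List.flatMap_congr
    intro d _
    show ((pvProdA xs n).map (fun s => d :: s)).flatMap (fun s => xs.map (fun e => s ++ [e]))
        = ((pvProdA xs n).flatMap (fun s => xs.map (fun e => s ++ [e]))).map (fun s => d :: s)
    rw [List.flatMap_map, List.map_flatMap]
    simp only [List.map_map]
    apply List.flatMap_congr
    intro s _
    apply List.map_congr_left
    intro e _
    simp [Function.comp]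

-- the digit loop is a foldl
theorem pvEmitLoop_eq_foldl (f : List Int → PySem.Set Int → List String → List String) :
    ∀ (ds : List Int) (pre : List Int) (sums : PySem.Set Int) (acc : List String),
      pvEmitLoop f pre sums acc ds
        = ds.foldl (fun a d => f (pre ++ [d]) (pvStepB sums d) a) acc := by
  intro ds
  induction ds with
  | nil => intro pre sums acc; rfl
  | cons d ds ih => intro pre sums acc; rw [pvEmitLoop, ih, List.foldl_cons]

-- the DFS equals a fold of pvLeaf over the product
theorem pvEmitB_eq_foldl (digits : List Int) (m : Int) :
    ∀ (n : Nat) (pre : List Int) (sums : PySem.Set Int) (acc : List String),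
      pvEmitB digits m n pre sums acc
        = (pvProdA digits n).foldl
            (fun a suf => pvLeaf m (pre ++ suf) (suf.foldl pvStepB sums) a) acc := by
  intro n
  induction n with
  | zero => intro pre sums acc; simp [pvProdA, pvEmitB, pvLeaf]
  | succ n ih =>
    intro pre sums acc
    rw [pvEmitB, pvEmitLoop_eq_foldl]
    rw [pvProdA_succ_left]
    rw [List.foldl_flatMap]
    simp only [List.foldl_map, ih, List.foldl_cons, List.append_assoc, List.singleton_append]

-- generalised signed sum (proof helper)
def pvSumFrom (y : Int) (seq : List Int) (signs : List String) : Int :=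
  (seq.zip signs).foldl (fun s p => if p.2 == "+" then s + p.1 else s - p.1) y

theorem pvSumA_eq (seq : List Int) (signs : List String) :
    pvSumA seq signs = pvSumFrom 0 seq signs := rfl

theorem pvSumFrom_cons (y d : Int) (seq : List Int) (c : String) (signs : List String) :
    pvSumFrom y (d :: seq) (c :: signs)
      = pvSumFrom (if c == "+" then y + d else y - d) seq signs := rfl

-- membership characterisation of pvSignsA
theorem mem_pvSignsA (n : Nat) (ss : List String) :
    ss ∈ pvSignsA n ↔ ss.length = n ∧ ∀ c ∈ ss, c = "+" ∨ c = "-" := by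
  induction n generalizing ss with
  | zero =>
    simp only [pvSignsA, List.mem_singleton, List.length_eq_zero_iff]
    exact ⟨fun h => ⟨h, by subst h; simp⟩, fun h => h.1⟩
  | succ n ih =>
    simp only [pvSignsA, List.mem_flatMap, List.mem_map]
    constructor
    · rintro ⟨t, ht, c, hc, rfl⟩
      obtain ⟨hl, hv⟩ := (ih t).mp ht
      refine ⟨by simp [hl], ?_⟩
      intro x hx
      rcases List.mem_append.mp hx with h | h
      · exact hv x h
      · simp only [List.mem_singleton] at h; subst h
        simpa using hc
    · rintro ⟨hl, hv⟩
      rcases List.eq_nil_or_concat ss with rfl | ⟨t, c, rfl⟩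
      · simp at hl
      · refine ⟨t, (ih t).mpr ⟨?_, ?_⟩, c, ?_, by simp⟩
        · simpa using hl
        · intro x hx; exact hv x (by simp [hx])
        · have := hv c (by simp)
          simpa using this

-- membership in one DP step
theorem mem_pvStepB (S : PySem.Set Int) (d x : Int) :
    x ∈ pvStepB S d ↔ ∃ y ∈ S, x = y + d ∨ x = y - d := by
  unfold pvStepB
  rw [PySem.Set.mem_union]
  simp only [PySem.Set.mem_ofList, List.mem_map]
  constructor
  · rintro (⟨y, hy, rfl⟩ | ⟨y, hy, rfl⟩)
    · exact ⟨y, hy, Or.inl rfl⟩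
    · exact ⟨y, hy, Or.inr rfl⟩
  · rintro ⟨y, hy, rfl | rfl⟩
    · exact Or.inl ⟨y, hy, rfl⟩
    · exact Or.inr ⟨y, hy, rfl⟩

-- reachability: the DP set holds exactly the signed sums
theorem mem_foldl_pvStepB (seq : List Int) :
    ∀ (S : PySem.Set Int) (x : Int),
      x ∈ seq.foldl pvStepB S
        ↔ ∃ y ∈ S, ∃ signs : List String, signs.length = seq.length ∧
            (∀ c ∈ signs, c = "+" ∨ c = "-") ∧ pvSumFrom y seq signs = x := by
  induction seq with
  | nil =>
    intro S x
    constructor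
    · intro hx; exact ⟨x, hx, [], rfl, by simp, rfl⟩
    · rintro ⟨y, hy, signs, hl, _, hs⟩
      have : signs = [] := List.length_eq_zero_iff.mp hl
      subst this
      simpa [pvSumFrom] using hs ▸ hy
  | cons d seq ih =>
    intro S x
    simp only [List.foldl_cons]
    rw [ih (pvStepB S d) x]
    constructor
    · rintro ⟨y', hy', signs, hl, hv, hs⟩
      obtain ⟨y, hy, hc⟩ := (mem_pvStepB S d y').mp hy'
      rcases hc with rfl | rfl
      · refine ⟨y, hy, "+" :: signs, by simp [hl], ?_, by simpa [pvSumFrom_cons] using hs⟩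
        intro c hcm
        rcases List.mem_cons.mp hcm with rfl | hcm
        · exact Or.inl rfl
        · exact hv c hcm
      · refine ⟨y, hy, "-" :: signs, by simp [hl], ?_, by simpa [pvSumFrom_cons] using hs⟩
        intro c hcm
        rcases List.mem_cons.mp hcm with rfl | hcm
        · exact Or.inr rfl
        · exact hv c hcm
    · rintro ⟨y, hy, signs, hl, hv, hs⟩
      match signs with
      | [] => simp at hl
      | c :: signs =>
        have hc := hv c (by simp)
        have hv' : ∀ c' ∈ signs, c' = "+" ∨ c' = "-" := fun c' h => hv c' (by simp [h])
        have hl' : signs.length = seq.length := by simpa using hl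
        rcases hc with rfl | rfl
        · exact ⟨y + d, (mem_pvStepB S d _).mpr ⟨y, hy, Or.inl rfl⟩, signs, hl', hv',
            by simpa [pvSumFrom_cons] using hs⟩
        · exact ⟨y - d, (mem_pvStepB S d _).mpr ⟨y, hy, Or.inr rfl⟩, signs, hl', hv',
            by simpa [pvSumFrom_cons] using hs⟩

theorem mem_pvSumsB (seq : List Int) (x : Int) :
    x ∈ pvSumsB seq ↔ ∃ signs ∈ pvSignsA seq.length, pvSumA seq signs = x := by
  unfold pvSumsB
  rw [mem_foldl_pvStepB]
  constructor
  · rintro ⟨y, hy, signs, hl, hv, hs⟩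
    have : y = 0 := by simpa [PySem.Set.ofList] using hy
    subst this
    exact ⟨signs, (mem_pvSignsA _ _).mpr ⟨hl, hv⟩, by simpa [pvSumA_eq] using hs⟩
  · rintro ⟨signs, hm, hs⟩
    obtain ⟨hl, hv⟩ := (mem_pvSignsA _ _).mp hm
    exact ⟨0, by simp [PySem.Set.ofList], signs, hl, hv, by simpa [pvSumA_eq] using hs⟩

-- ---- characterisation of A's best_final fold ----
theorem foldl_pvUpdA_eq_none (vals : List Int) :
    ∀ acc, vals.foldl pvUpdA acc = none ↔ acc = none ∧ ∀ v ∈ vals, v < 0 := by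
  induction vals with
  | nil => intro acc; simp
  | cons v t ih =>
    intro acc
    simp only [List.foldl_cons]
    rw [ih (pvUpdA acc v)]
    have h : pvUpdA acc v = none ↔ acc = none ∧ v < 0 := by
      rcases acc with _ | b <;> simp only [pvUpdA] <;> split_ifs <;> simp_all
    rw [h]
    constructor
    · rintro ⟨⟨h1, h2⟩, h3⟩
      refine ⟨h1, fun w hw => ?_⟩
      rcases List.mem_cons.mp hw with rfl | hw
      · exact h2
      · exact h3 w hw
    · rintro ⟨h1, h2⟩
      exact ⟨⟨h1, h2 v (by simp)⟩, fun w hw => h2 w (List.mem_cons_of_mem _ hw)⟩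

theorem foldl_pvUpdA_spec (vals : List Int) :
    ∀ acc m, vals.foldl pvUpdA acc = some m →
      ((0 ≤ m ∧ m ∈ vals) ∨ acc = some m) ∧
      (∀ v ∈ vals, 0 ≤ v → m ≤ v) ∧
      (∀ b, acc = some b → m ≤ b) := by
  induction vals with
  | nil =>
    intro acc m h
    simp only [List.foldl_nil] at h
    refine ⟨Or.inr h, by simp, fun b hb => ?_⟩
    rw [h] at hb
    injection hb with hb
    omega
  | cons v t ih =>
    intro acc m h
    simp only [List.foldl_cons] at h
    obtain ⟨H1, H2, H3⟩ := ih (pvUpdA acc v) m h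
    have hstep : ∀ b, pvUpdA acc v = some b → (b = v ∧ 0 ≤ v) ∨ acc = some b := by
      intro b hb
      rcases acc with _ | c
      · simp only [pvUpdA] at hb
        split_ifs at hb with h1
        exact Or.inl ⟨(Option.some.inj hb).symm, h1⟩
      · simp only [pvUpdA] at hb
        split_ifs at hb with h1 h2
        · exact Or.inl ⟨(Option.some.inj hb).symm, h1⟩
        · exact Or.inr hb
        · exact Or.inr hb
    refine ⟨?_, ?_, ?_⟩
    · rcases H1 with ⟨hm, hmem⟩ | hacc
      · exact Or.inl ⟨hm, by simp [hmem]⟩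
      · rcases hstep m hacc with ⟨rfl, hv⟩ | h
        · exact Or.inl ⟨hv, by simp⟩
        · exact Or.inr h
    · intro w hw hw0
      rcases List.mem_cons.mp hw with rfl | hw
      · -- w = v: show m ≤ v
        unfold pvUpdA at H3
        rcases acc with _ | c
        · exact H3 w (by simp [hw0])
        · by_cases hlt : w < c
          · exact H3 w (by simp [hw0, hlt])
          · have := H3 c (by simp [hw0, hlt])
            omega
      · exact H2 w hw hw0
    · intro b hb
      subst hb
      unfold pvUpdA at H3
      by_cases hv : 0 ≤ v
      · by_cases hlt : v < b
        · have := H3 v (by simp [hv, hlt])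
          omega
        · exact H3 b (by simp [hv, hlt])
      · exact H3 b (by simp [hv])

-- ---- per-sequence equality ----
theorem pvBest_eq (seq : List Int) :
    pvBestA seq seq.length = pvBestB seq := by
  have hmap : pvBestA seq seq.length
      = ((pvSignsA seq.length).map (pvSumA seq)).foldl pvUpdA none := by
    unfold pvBestA
    rw [List.foldl_map]
  set vals := (pvSignsA seq.length).map (pvSumA seq) with hvals
  set flt := (pvSumsB seq).filter (fun s => decide (0 ≤ s)) with hflt
  have hmemvals : ∀ x, x ∈ vals ↔ x ∈ pvSumsB seq := by
    intro x
    rw [hvals, List.mem_map, mem_pvSumsB]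
  have hmemflt : ∀ x, x ∈ flt ↔ x ∈ vals ∧ 0 ≤ x := by
    intro x
    rw [hflt, List.mem_filter, hmemvals]
    simp
  rw [hmap]
  unfold pvBestB
  rw [← hflt]
  match hA : vals.foldl pvUpdA none, hB : PySem.List.min? flt (fun x => x) with
  | none, none => rfl
  | none, some m2 =>
    exfalso
    have hall := ((foldl_pvUpdA_eq_none vals none).mp hA).2
    have hm2 := PySem.List.min?_mem hB
    have := (hmemflt m2).mp hm2
    have := hall m2 ((hmemvals m2).mpr ((hmemvals m2).mp this.1) )
    have h2 := (hmemflt m2).mp hm2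
    omega
  | some m1, none =>
    exfalso
    obtain ⟨H1, _, _⟩ := foldl_pvUpdA_spec vals none m1 hA
    rcases H1 with ⟨hm0, hmem⟩ | h
    · have : m1 ∈ flt := (hmemflt m1).mpr ⟨hmem, hm0⟩
      rw [PySem.List.min?_eq_none_iff] at hB
      simp [hB] at this
    · simp at h
  | some m1, some m2 =>
    obtain ⟨H1, H2, _⟩ := foldl_pvUpdA_spec vals none m1 hA
    rcases H1 with ⟨hm0, hmem⟩ | h
    · have hm1flt : m1 ∈ flt := (hmemflt m1).mpr ⟨hmem, hm0⟩
      have hle21 : m2 ≤ m1 := PySem.List.min?_isMin hB m1 hm1flt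
      have hm2 := (hmemflt m2).mp (PySem.List.min?_mem hB)
      have hle12 : m1 ≤ m2 := H2 m2 hm2.1 hm2.2
      have : m1 = m2 := le_antisymm hle12 hle21
      rw [this]
    · simp at h

-- length of members of the product
theorem length_mem_pvProdA (xs : List Int) (n : Nat) :
    ∀ s ∈ pvProdA xs n, s.length = n := by
  induction n with
  | zero => intro s hs; simp [pvProdA] at hs; simp [hs]
  | succ n ih =>
    intro s hs
    simp only [pvProdA, List.mem_flatMap, List.mem_map] at hs
    obtain ⟨t, ht, d, _, rfl⟩ := hs
    simp [ih t ht]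

-- ===== VERDICT (by name: the statement is the Claim_ definition above) =====
theorem generate_text_dataset_one_shot_spec : Claim_equal_generate_text_dataset_one_shot := by
  intro digit_range seq_length _ hpre
  unfold Spec_generate_text_dataset_one_shot
  unfold generate_text_dataset_one_shot generate_text_dataset_one_shot_alt
  rw [pvEmitB_eq_foldl]
  apply PySem.List.foldl_congr_mem
  intro acc seq hseq
  have hlen : seq.length = seq_length.toNat := length_mem_pvProdA _ _ seq hseq
  show (match pvBestA seq seq_length.toNat with
    | none => acc
    | some b => acc ++ [pvLineA seq seq_length.toNat b])
    = pvLeaf seq_length ([] ++ seq) (seq.foldl pvStepB (PySem.Set.ofList [0])) acc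
  have hb : pvBestA seq seq_length.toNat = pvBestB seq := by
    rw [← hlen]
    exact pvBest_eq seq
  have hleaf : pvLeaf seq_length ([] ++ seq) (seq.foldl pvStepB (PySem.Set.ofList [0])) acc
      = (match pvBestB seq with
         | none => acc
         | some b => acc ++ [pvLineA seq seq_length.toNat b]) := rfl
  rw [hleaf, hb]
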